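-- pv_equiv track=rewrite | github.com/noiehoie/gpucall | gpucall/recipe_materialize.py | _round_context_budget
-- ===== SOURCE A (Python) =====
-- from typing import Any
--
-- CONTEXT_BUDGET_TIERS = (8192, 32768, 65536, 131072, 262144, 524288, 1010000)
--
-- def _round_context_budget(value: Any) -> int:
--     try:
--         required = int(value)
--     except (TypeError, ValueError):
--         required = 8192
--     for candidate in CONTEXT_BUDGET_TIERS:
--         if required <= candidate:
--             return candidate
--     return _next_power_of_two(required)
--
-- def _next_power_of_two(value: int) -> int:
--     required = max(1, int(value))
--     return 1 << (required - 1).bit_length()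
-- ===== SOURCE B (Python) =====
-- CONTEXT_BUDGET_TIERS = (8192, 32768, 65536, 131072, 262144, 524288, 1010000)
--
-- def _round_context_budget(value):
--     try:
--         required = int(value)
--     except (TypeError, ValueError):
--         required = 8192
--     # binary search for the leftmost tier >= required
--     lo, hi = 0, len(CONTEXT_BUDGET_TIERS)
--     while lo < hi:
--         mid = (lo + hi) // 2
--         if CONTEXT_BUDGET_TIERS[mid] < required:
--             lo = mid + 1
--         else:
--             hi = mid
--     if lo < len(CONTEXT_BUDGET_TIERS):
--         return CONTEXT_BUDGET_TIERS[lo]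
--     return _next_power_of_two(required)
--
-- def _next_power_of_two(value):
--     required = max(1, int(value))
--     return 1 << (required - 1).bit_length()
-- ===== Notes on version B (the rewrite author's own statement) =====
-- stated objective: idiomatic
-- what changed: Replaces the linear first-match scan over the tier tuple with a hand-written bisect_left binary search that picks the leftmost tier >= required, falling through to the same power-of-two helper.
import Mathlib
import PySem

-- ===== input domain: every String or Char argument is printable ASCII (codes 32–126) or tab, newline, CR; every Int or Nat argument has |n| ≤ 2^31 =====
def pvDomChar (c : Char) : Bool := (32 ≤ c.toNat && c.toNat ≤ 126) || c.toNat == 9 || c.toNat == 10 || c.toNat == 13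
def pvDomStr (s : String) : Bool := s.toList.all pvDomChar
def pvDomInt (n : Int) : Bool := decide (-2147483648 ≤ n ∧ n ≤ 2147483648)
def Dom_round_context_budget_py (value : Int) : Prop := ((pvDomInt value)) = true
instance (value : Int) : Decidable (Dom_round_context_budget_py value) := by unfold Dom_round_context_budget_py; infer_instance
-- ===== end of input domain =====

-- B replaces A's linear first-match scan over the tier tuple with a hand-written
-- bisect_left binary search (leftmost tier >= required); same power-of-two fallback.

-- ===== PORT A =====
def pvTiersA : List Int := [8192, 32768, 65536, 131072, 262144, 524288, 1010000]

-- _next_power_of_two: required = max(1, value); 1 << (required-1).bit_length()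
def pvNextPow2A (value : Int) : Int :=
  let required := max 1 value
  ((1 <<< PySem.Int.bitLength (required - 1) : Nat) : Int)

-- the 'for candidate in CONTEXT_BUDGET_TIERS' scan with early return
def pvScanA (required : Int) : List Int → Int
  | [] => pvNextPow2A required
  | c :: rest => if required ≤ c then c else pvScanA required rest

def round_context_budget_py (value : Int) : Int :=
  -- int(value) on an Int argument is the identity; the except branch is unreachable
  pvScanA value pvTiersA

-- ===== PORT B =====
def pvTiersB : List Int := [8192, 32768, 65536, 131072, 262144, 524288, 1010000]

def pvNextPow2B (value : Int) : Int :=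
  let required := max 1 value
  ((1 <<< PySem.Int.bitLength (required - 1) : Nat) : Int)

-- the 'while lo < hi' bisect_left loop; indices stay within [0, len(tiers)]
def pvBsearchB (required : Int) (lo hi : Nat) : Nat :=
  if _h : lo < hi then
    let mid := (lo + hi) / 2
    if pvTiersB.getD mid 0 < required then pvBsearchB required (mid + 1) hi
    else pvBsearchB required lo mid
  else lo
termination_by hi - lo
decreasing_by all_goals omega

def round_context_budget_py_alt (value : Int) : Int :=
  let lo := pvBsearchB value 0 pvTiersB.length
  if lo < pvTiersB.length then pvTiersB.getD lo 0  -- CONTEXT_BUDGET_TIERS[lo], index in range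
  else pvNextPow2B value

-- ===== PRECONDITION & SPEC =====
def Spec_round_context_budget_py (value : Int) (out : Int) : Prop := out = round_context_budget_py_alt value
instance (value : Int) (out : Int) : Decidable (Spec_round_context_budget_py value out) := by unfold Spec_round_context_budget_py; infer_instance

-- ===== CLAIM (what is proved, stated in full; the proofs are below) =====
def Claim_equal_round_context_budget_py : Prop := ∀ (value : Int), Dom_round_context_budget_py value → Spec_round_context_budget_py value (round_context_budget_py value)

-- ===== LEMMAS AND PROOFS =====
theorem pv_bs_base (v : Int) (lo : Nat) : pvBsearchB v lo lo = lo := by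
  rw [pvBsearchB]; simp

theorem pv_bs_eval (v : Int) : pvBsearchB v 0 7 =
    if v ≤ 8192 then 0 else if v ≤ 32768 then 1 else if v ≤ 65536 then 2
    else if v ≤ 131072 then 3 else if v ≤ 262144 then 4 else if v ≤ 524288 then 5
    else if v ≤ 1010000 then 6 else 7 := by
  have h67 : pvBsearchB v 6 7 = if 1010000 < v then 7 else 6 := by
    rw [pvBsearchB]; norm_num [pvTiersB, pv_bs_base]
  have h45 : pvBsearchB v 4 5 = if 262144 < v then 5 else 4 := by
    rw [pvBsearchB]; norm_num [pvTiersB, pv_bs_base]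
  have h47 : pvBsearchB v 4 7 = if 524288 < v then (if 1010000 < v then 7 else 6) else (if 262144 < v then 5 else 4) := by
    rw [pvBsearchB]; norm_num [pvTiersB, h67, h45]
  have h23 : pvBsearchB v 2 3 = if 65536 < v then 3 else 2 := by
    rw [pvBsearchB]; norm_num [pvTiersB, pv_bs_base]
  have h01 : pvBsearchB v 0 1 = if 8192 < v then 1 else 0 := by
    rw [pvBsearchB]; norm_num [pvTiersB, pv_bs_base]
  have h03 : pvBsearchB v 0 3 = if 32768 < v then (if 65536 < v then 3 else 2) else (if 8192 < v then 1 else 0) := by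
    rw [pvBsearchB]; norm_num [pvTiersB, h23, h01]
  rw [pvBsearchB]; norm_num [pvTiersB, h47, h03]
  split_ifs <;> omega

theorem pv_eq (value : Int) : round_context_budget_py value = round_context_budget_py_alt value := by
  have hlen : pvTiersB.length = 7 := by norm_num [pvTiersB]
  unfold round_context_budget_py round_context_budget_py_alt
  rw [hlen, pv_bs_eval]
  simp only [pvScanA, pvTiersA]
  split_ifs <;> first | rfl | (exfalso; omega)

-- ===== VERDICT (by name: the statement is the Claim_ definition above) =====
theorem round_context_budget_py_spec : Claim_equal_round_context_budget_py := by
  intro value _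
  unfold Spec_round_context_budget_py
  exact pv_eq value
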